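-- pv_equiv track=rewrite | github.com/scttfrdmn/project-prism | src/backends/trainium_v2.py | generate_optimal_layer_mapping
-- ===== SOURCE A (Python) =====
-- from typing import Any, Dict, List, Optional, Tuple, Union
--
-- def generate_optimal_layer_mapping(num_layers: int, is_large_model: bool) -> Dict[int, int]:
--     """
--     Generate optimal mapping of transformer layers to devices for Trainium 2.
--
--     Args:
--         num_layers: Number of transformer layers
--         is_large_model: Whether this is a large model needing special handling
--
--     Returns:
--         Dictionary mapping layer indices to device indices
--     """
--     # Simple example implementation - in practice would be more sophisticated
--     layer_map = {}
--
--     if is_large_model: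
--         # For large models, distribute across up to 8 devices
--         devices_to_use = min(8, num_layers)
--         layers_per_device = num_layers // devices_to_use
--
--         for layer_idx in range(num_layers):
--             device_idx = min(layer_idx // layers_per_device, devices_to_use - 1)
--             layer_map[layer_idx] = device_idx
--     else:
--         # For smaller models, use up to 2 devices
--         devices_to_use = min(2, num_layers)
--         layers_per_device = num_layers // devices_to_use
--
--         for layer_idx in range(num_layers):
--             device_idx = min(layer_idx // layers_per_device, devices_to_use - 1)
--             layer_map[layer_idx] = device_idx
--
--     return layer_map
-- ===== SOURCE B (Python) =====
-- def generate_optimal_layer_mapping(num_layers: int, is_large_model: bool) -> dict: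
--     """Device-outer construction: assign each device its contiguous block of
--     layers; the last device absorbs the remainder."""
--     max_devices = 8 if is_large_model else 2
--     devices_to_use = min(max_devices, num_layers)
--     layers_per_device = num_layers // devices_to_use  # ZeroDivisionError when num_layers == 0, as in A
--     layer_map = {}
--     for d in range(devices_to_use):
--         start = d * layers_per_device
--         end = num_layers if d == devices_to_use - 1 else (d + 1) * layers_per_device
--         for layer in range(start, end):
--             layer_map[layer] = d
--     return layer_map
-- ===== Notes on version B (the rewrite author's own statement) =====
-- stated objective: alternative
-- what changed: Replaced the per-layer loop computing min(layer_idx // layers_per_device, devices_to_use - 1) for every layer by a device-outer construction: each device is assigned its contiguous block of layers directly (the last device absorbing the remainder), so the per-layer division and min disappear; the duplicated large/small branches collapse into one computation of max_devices.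
import Mathlib
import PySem

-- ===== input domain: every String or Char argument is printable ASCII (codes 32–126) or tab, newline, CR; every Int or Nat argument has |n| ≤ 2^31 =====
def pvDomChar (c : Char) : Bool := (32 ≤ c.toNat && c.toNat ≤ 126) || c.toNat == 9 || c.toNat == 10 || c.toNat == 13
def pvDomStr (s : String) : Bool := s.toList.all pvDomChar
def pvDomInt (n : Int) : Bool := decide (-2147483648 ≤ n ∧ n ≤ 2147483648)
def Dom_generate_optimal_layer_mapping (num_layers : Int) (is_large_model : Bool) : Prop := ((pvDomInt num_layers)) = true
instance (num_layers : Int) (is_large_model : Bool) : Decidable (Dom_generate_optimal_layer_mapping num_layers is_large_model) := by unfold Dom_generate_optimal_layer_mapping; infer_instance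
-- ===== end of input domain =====

-- B builds the layer map device-by-device (each device gets its contiguous block, the
-- last device absorbing the remainder) instead of computing min(i // lpd, dc-1) per layer;
-- objective: alternative decomposition (same O(num_layers) cost).

-- ===== PORT A =====
def generate_optimal_layer_mapping (num_layers : Int) (is_large_model : Bool) : List (Int × Int) :=
  if is_large_model then
    let devices_to_use := min 8 num_layers
    let layers_per_device := PySem.Int.floordiv num_layers devices_to_use
    ((PySem.List.pyRange 0 num_layers 1).foldl
      (fun layer_map layer_idx =>
        layer_map.insert layer_idx
          (min (PySem.Int.floordiv layer_idx layers_per_device) (devices_to_use - 1)))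
      PySem.Dict.empty).items
  else
    let devices_to_use := min 2 num_layers
    let layers_per_device := PySem.Int.floordiv num_layers devices_to_use
    ((PySem.List.pyRange 0 num_layers 1).foldl
      (fun layer_map layer_idx =>
        layer_map.insert layer_idx
          (min (PySem.Int.floordiv layer_idx layers_per_device) (devices_to_use - 1)))
      PySem.Dict.empty).items

-- ===== PORT B =====
def generate_optimal_layer_mapping_alt (num_layers : Int) (is_large_model : Bool) : List (Int × Int) :=
  let max_devices : Int := if is_large_model then 8 else 2
  let devices_to_use := min max_devices num_layers
  let layers_per_device := PySem.Int.floordiv num_layers devices_to_use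
  ((PySem.List.pyRange 0 devices_to_use 1).foldl
    (fun layer_map d =>
      let start := d * layers_per_device
      let stop := if d == devices_to_use - 1 then num_layers else (d + 1) * layers_per_device
      (PySem.List.pyRange start stop 1).foldl (fun m layer => m.insert layer d) layer_map)
    PySem.Dict.empty).items

-- ===== PRECONDITION & SPEC =====
-- Pre_ excludes exactly num_layers = 0, where the Python A (and B) raises ZeroDivisionError.
def Pre_generate_optimal_layer_mapping (num_layers : Int) (is_large_model : Bool) : Prop :=
  num_layers ≠ 0
instance (num_layers : Int) (is_large_model : Bool) : Decidable (Pre_generate_optimal_layer_mapping num_layers is_large_model) := by unfold Pre_generate_optimal_layer_mapping; infer_instance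
def pvWitness_generate_optimal_layer_mapping : Int × Bool := (7, true)

def Spec_generate_optimal_layer_mapping (num_layers : Int) (is_large_model : Bool) (out : List (Int × Int)) : Prop := out = generate_optimal_layer_mapping_alt num_layers is_large_model
instance (num_layers : Int) (is_large_model : Bool) (out : List (Int × Int)) : Decidable (Spec_generate_optimal_layer_mapping num_layers is_large_model out) := by unfold Spec_generate_optimal_layer_mapping; infer_instance

-- ===== CLAIM (what is proved, stated in full; the proofs are below) =====
def Claim_equal_generate_optimal_layer_mapping : Prop := ∀ (num_layers : Int) (is_large_model : Bool), Dom_generate_optimal_layer_mapping num_layers is_large_model → Pre_generate_optimal_layer_mapping num_layers is_large_model → Spec_generate_optimal_layer_mapping num_layers is_large_model (generate_optimal_layer_mapping num_layers is_large_model)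

-- ===== LEMMAS AND PROOFS =====

-- A's loop over all layers, as a map (fresh increasing keys append in order).
lemma a_items (n lpd dc : Int) :
    ((PySem.List.pyRange 0 n 1).foldl
      (fun layer_map layer_idx =>
        layer_map.insert layer_idx
          (min (PySem.Int.floordiv layer_idx lpd) (dc - 1)))
      PySem.Dict.empty).items
    = (PySem.List.pyRange 0 n 1).map
        (fun i => (i, min (PySem.Int.floordiv i lpd) (dc - 1))) := by
  have h := PySem.Dict.items_foldl_insert_fresh (PySem.List.pyRange 0 n 1)
      (fun i => i) (fun i => min (PySem.Int.floordiv i lpd) (dc - 1)) PySem.Dict.empty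
      (fun a _ => PySem.Dict.contains_empty a)
      (by simpa using PySem.List.nodup_pyRange_one 0 n)
  simpa using h

-- B's partial fold over the first t (non-last) devices covers layers [0, t*lpd).
lemma b_partial (n lpd dc : Int) (hdc : 1 ≤ dc) (hlpd : 1 ≤ lpd) (hdn : dc * lpd ≤ n)
    (t : Nat) (ht : (t : Int) ≤ dc - 1) :
    ((PySem.List.pyRange 0 (t : Int) 1).foldl
      (fun layer_map d =>
        (PySem.List.pyRange (d * lpd)
            (if d == dc - 1 then n else (d + 1) * lpd) 1).foldl
          (fun m layer => m.insert layer d) layer_map)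
      PySem.Dict.empty).items
    = (PySem.List.pyRange 0 ((t : Int) * lpd) 1).map
        (fun i => (i, min (PySem.Int.floordiv i lpd) (dc - 1))) := by
  induction t with
  | zero =>
    simp only [Nat.cast_zero, zero_mul,
      PySem.List.pyRange_one_eq_nil (le_refl (0:Int)), List.foldl_nil, List.map_nil]
    rfl
  | succ t ih =>
    have ht' : (t : Int) ≤ dc - 1 := by push_cast at ht ⊢; omega
    have htlt : (t : Int) < dc - 1 := by push_cast at ht; omega
    have hstep : PySem.List.pyRange 0 ((t : Int) + 1) 1
        = PySem.List.pyRange 0 (t : Int) 1 ++ [(t : Int)] :=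
      PySem.List.pyRange_one_succ_right (by positivity)
    set Astep := fun (layer_map : PySem.Dict Int Int) (d : Int) =>
      (PySem.List.pyRange (d * lpd)
          (if d == dc - 1 then n else (d + 1) * lpd) 1).foldl
        (fun m layer => m.insert layer d) layer_map with hAstep
    have hcast : ((t + 1 : Nat) : Int) = (t : Int) + 1 := by push_cast; ring
    rw [hcast, hstep, List.foldl_append]
    simp only [List.foldl_cons, List.foldl_nil]
    rw [hAstep]
    have hne : ((t : Int) == dc - 1) = false := by
      simp only [beq_eq_false_iff_ne]; omega
    simp only [hne, Bool.false_eq_true, if_false]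
    set D := (PySem.List.pyRange 0 (t : Int) 1).foldl Astep PySem.Dict.empty with hD
    have hDitems : D.items = (PySem.List.pyRange 0 ((t : Int) * lpd) 1).map
        (fun i => (i, min (PySem.Int.floordiv i lpd) (dc - 1))) := ih ht'
    have hDkeys : D.keys = PySem.List.pyRange 0 ((t : Int) * lpd) 1 := by
      show D.items.map (·.1) = _
      rw [hDitems, List.map_map]
      exact List.map_id'' (fun _ => rfl) _
    have hfresh : ∀ a ∈ PySem.List.pyRange ((t : Int) * lpd) (((t : Int) + 1) * lpd) 1,
        D.contains a = false := by
      intro a ha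
      rw [PySem.List.mem_pyRange_one] at ha
      rw [PySem.Dict.contains_eq_decide_mem_keys, hDkeys]
      simp only [decide_eq_false_iff_not, PySem.List.mem_pyRange_one]
      omega
    have h := PySem.Dict.items_foldl_insert_fresh
        (PySem.List.pyRange ((t : Int) * lpd) (((t : Int) + 1) * lpd) 1)
        (fun i => i) (fun _ => (t : Int)) D hfresh
        (by simpa using PySem.List.nodup_pyRange_one ((t : Int) * lpd) (((t : Int) + 1) * lpd))
    have hsplit : PySem.List.pyRange 0 (((t : Int) + 1) * lpd) 1
        = PySem.List.pyRange 0 ((t : Int) * lpd) 1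
          ++ PySem.List.pyRange ((t : Int) * lpd) (((t : Int) + 1) * lpd) 1 :=
      PySem.List.pyRange_one_append 0 ((t : Int) * lpd) (((t : Int) + 1) * lpd)
        (mul_nonneg (by positivity) (by omega)) (by nlinarith)
    calc ((PySem.List.pyRange ((t : Int) * lpd) (((t : Int) + 1) * lpd) 1).foldl
            (fun m layer => m.insert layer (t : Int)) D).items
        = D.items ++ (PySem.List.pyRange ((t : Int) * lpd) (((t : Int) + 1) * lpd) 1).map
            (fun a => (a, (t : Int))) := by simpa using h
      _ = (PySem.List.pyRange 0 (((t : Int) + 1) * lpd) 1).map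
            (fun i => (i, min (PySem.Int.floordiv i lpd) (dc - 1))) := by
          rw [hDitems, hsplit, List.map_append]
          congr 1
          apply List.map_congr_left
          intro i hi
          rw [PySem.List.mem_pyRange_one] at hi
          have hfd : PySem.Int.floordiv i lpd = (t : Int) := by
            rw [PySem.Int.floordiv_eq_iff_of_pos (by omega)]
            constructor
            · exact hi.1
            · exact hi.2
          rw [hfd, min_eq_left (by omega)]

-- core equality for positive num_layers, one max_devices value md ≥ 1
lemma core (n md : Int) (hmd : 1 ≤ md) (hn : 0 < n) :
    ((PySem.List.pyRange 0 n 1).foldl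
      (fun layer_map layer_idx =>
        layer_map.insert layer_idx
          (min (PySem.Int.floordiv layer_idx (PySem.Int.floordiv n (min md n)))
            (min md n - 1)))
      PySem.Dict.empty).items
    = ((PySem.List.pyRange 0 (min md n) 1).foldl
        (fun layer_map d =>
          (PySem.List.pyRange (d * PySem.Int.floordiv n (min md n))
              (if d == min md n - 1 then n
               else (d + 1) * PySem.Int.floordiv n (min md n)) 1).foldl
            (fun m layer => m.insert layer d) layer_map)
        PySem.Dict.empty).items := by
  set dc := min md n with hdc
  set lpd := PySem.Int.floordiv n dc with hlpd
  have hdc1 : 1 ≤ dc := by simp only [hdc, le_min_iff]; omega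
  have hdcn : dc ≤ n := min_le_right _ _
  have hlpd1 : 1 ≤ lpd := by
    show (1 : Int) ≤ PySem.Int.floordiv n dc
    rw [PySem.Int.le_floordiv_iff_mul_le (by omega)]
    omega
  have hdn : dc * lpd ≤ n := by
    have hq : PySem.Int.floordiv n dc = lpd := hlpd.symm
    have := (PySem.Int.floordiv_eq_iff_of_pos (a := n) (b := dc) (q := lpd)
      (by omega)).mp hq
    nlinarith [this.1]
  have hlast : PySem.List.pyRange 0 dc 1
      = PySem.List.pyRange 0 (dc - 1) 1 ++ [dc - 1] := by
    have h := PySem.List.pyRange_one_succ_right (a := 0) (b := dc - 1) (by omega)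
    rw [sub_add_cancel] at h
    exact h
  rw [a_items, hlast, List.foldl_append]
  simp only [List.foldl_cons, List.foldl_nil]
  have htc : (((dc - 1).toNat : Int)) = dc - 1 := by omega
  have hprev := b_partial n lpd dc hdc1 hlpd1 hdn (dc - 1).toNat (by omega)
  rw [htc] at hprev
  set Astep := fun (layer_map : PySem.Dict Int Int) (d : Int) =>
    (PySem.List.pyRange (d * lpd) (if d == dc - 1 then n else (d + 1) * lpd) 1).foldl
      (fun m layer => m.insert layer d) layer_map with hAstep
  set D := (PySem.List.pyRange 0 (dc - 1) 1).foldl Astep PySem.Dict.empty with hD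
  have hDitems : D.items = (PySem.List.pyRange 0 ((dc - 1) * lpd) 1).map
      (fun i => (i, min (PySem.Int.floordiv i lpd) (dc - 1))) := hprev
  have hDkeys : D.keys = PySem.List.pyRange 0 ((dc - 1) * lpd) 1 := by
    show D.items.map (·.1) = _
    rw [hDitems, List.map_map]
    exact List.map_id'' (fun _ => rfl) _
  have heq : (dc - 1 == dc - 1) = true := by simp
  show _ = (Astep D (dc - 1)).items
  rw [hAstep]
  simp only [heq, if_true]
  have hfresh : ∀ a ∈ PySem.List.pyRange ((dc - 1) * lpd) n 1, D.contains a = false := by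
    intro a ha
    rw [PySem.List.mem_pyRange_one] at ha
    rw [PySem.Dict.contains_eq_decide_mem_keys, hDkeys]
    simp only [decide_eq_false_iff_not, PySem.List.mem_pyRange_one]
    omega
  have h := PySem.Dict.items_foldl_insert_fresh
      (PySem.List.pyRange ((dc - 1) * lpd) n 1)
      (fun i => i) (fun _ => dc - 1) D hfresh
      (by simpa using PySem.List.nodup_pyRange_one ((dc - 1) * lpd) n)
  have hsplit : PySem.List.pyRange 0 n 1
      = PySem.List.pyRange 0 ((dc - 1) * lpd) 1
        ++ PySem.List.pyRange ((dc - 1) * lpd) n 1 :=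
    PySem.List.pyRange_one_append 0 ((dc - 1) * lpd) n
      (mul_nonneg (by omega) (by omega)) (by nlinarith)
  calc (PySem.List.pyRange 0 n 1).map
          (fun i => (i, min (PySem.Int.floordiv i lpd) (dc - 1)))
      = (PySem.List.pyRange 0 ((dc - 1) * lpd) 1).map
          (fun i => (i, min (PySem.Int.floordiv i lpd) (dc - 1)))
        ++ (PySem.List.pyRange ((dc - 1) * lpd) n 1).map
          (fun a => (a, dc - 1)) := by
        rw [hsplit, List.map_append]
        congr 1
        apply List.map_congr_left
        intro i hi
        rw [PySem.List.mem_pyRange_one] at hi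
        have hge : dc - 1 ≤ PySem.Int.floordiv i lpd := by
          rw [PySem.Int.le_floordiv_iff_mul_le (by omega)]; exact hi.1
        rw [min_eq_right hge]
    _ = ((PySem.List.pyRange ((dc - 1) * lpd) n 1).foldl
          (fun m layer => m.insert layer (dc - 1)) D).items := by
        rw [hDitems.symm] at *
        have h' : ((PySem.List.pyRange ((dc - 1) * lpd) n 1).foldl
            (fun m layer => m.insert layer (dc - 1)) D).items
            = D.items ++ (PySem.List.pyRange ((dc - 1) * lpd) n 1).map
                (fun a => (a, dc - 1)) := by simpa using h
        rw [h', hDitems]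

-- ===== VERDICT (by name: the statement is the Claim_ definition above) =====
theorem generate_optimal_layer_mapping_spec : Claim_equal_generate_optimal_layer_mapping := by
  intro n b _ hpre
  unfold Spec_generate_optimal_layer_mapping
  unfold Pre_generate_optimal_layer_mapping at hpre
  rcases lt_or_gt_of_ne hpre with hneg | hpos
  · -- n < 0: both loops run over empty ranges
    have h1 : PySem.List.pyRange 0 n 1 = [] := PySem.List.pyRange_one_eq_nil (by omega)
    have h2 : ∀ md : Int, 1 ≤ md → PySem.List.pyRange 0 (min md n) 1 = [] := fun md _ =>
      PySem.List.pyRange_one_eq_nil (by omega)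
    cases b <;>
      simp [generate_optimal_layer_mapping, generate_optimal_layer_mapping_alt, h1,
        h2 8 (by omega), h2 2 (by omega)]
  · cases b
    · exact core n 2 (by omega) hpos
    · exact core n 8 (by omega) hpos
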